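-- pv_equiv track=rewrite | github.com/swiss-seismological-service/DUGseis | dug_seis/gui/gui_util.py | indent_yaml_values
-- ===== SOURCE A (Python) =====
-- def indent_yaml_values(txt):
--     lines = txt.split('\n')
--     result = []
--     for line in lines:
--         pos_colon = line.find(':')
--         if pos_colon >= 0:
--             if line[pos_colon + 1:pos_colon + 2] == ' ':
--                 result.append(line[:pos_colon] + (' ' * (30 - pos_colon)) + line[pos_colon:])
--             else:
--                 result.append(line)
--         else:
--             result.append(line)
--     return '\n'.join(result)
-- ===== SOURCE B (Python) =====
-- import re
--
-- def indent_yaml_values(txt):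
--     # One multiline regex substitution instead of split/loop/join:
--     # each line's first colon (when followed by a space) gets its prefix
--     # left-justified to column 30.
--     return re.sub(r'^([^:\n]*):(?= )',
--                   lambda m: m.group(1).ljust(30) + ':',
--                   txt, flags=re.M)
-- ===== Notes on version B (the rewrite author's own statement) =====
-- stated objective: idiomatic
-- what changed: The explicit split-into-lines loop with find/slice surgery per line is replaced by a single multiline regex substitution (re.sub anchored at line starts under re.M) whose replacement left-justifies the captured pre-colon prefix to column 30; the Lean port of B is the corresponding one-pass automaton.
import Mathlib
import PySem

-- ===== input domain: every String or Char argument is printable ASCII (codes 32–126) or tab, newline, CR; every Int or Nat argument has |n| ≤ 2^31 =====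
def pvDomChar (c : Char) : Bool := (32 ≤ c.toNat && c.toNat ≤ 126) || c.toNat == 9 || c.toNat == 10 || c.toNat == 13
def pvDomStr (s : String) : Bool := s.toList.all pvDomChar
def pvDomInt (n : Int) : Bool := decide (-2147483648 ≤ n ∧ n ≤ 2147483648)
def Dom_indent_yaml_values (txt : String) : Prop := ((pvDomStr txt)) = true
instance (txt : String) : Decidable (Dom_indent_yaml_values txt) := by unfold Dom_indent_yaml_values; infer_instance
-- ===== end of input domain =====

-- B replaces A's explicit line loop with a single multiline-regex substitution; the Lean port of B
-- is the corresponding one-pass automaton over the characters (idiomatic rewrite, same cost).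

-- ===== PORT A =====
-- one line of A's loop body: find ':', check the next char is ' ', pad to column 30
def aLine (line : List Char) : List Char :=
  let posColon := PySem.Chars.find line [':']
  if 0 ≤ posColon then
    if PySem.List.slice line (some (posColon + 1)) (some (posColon + 2)) = [' '] then
      PySem.List.slice line none (some posColon)
        ++ List.replicate (30 - posColon).toNat ' '
        ++ PySem.List.slice line (some posColon) none
    else line
  else line

def indent_yaml_values (txt : String) : String :=
  let lines := PySem.Chars.splitOn txt.toList ['\n']
  let result := lines.foldl (fun r line => r ++ [aLine line]) []
  String.ofList (PySem.Chars.join ['\n'] result)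

-- ===== PORT B =====
-- the regex ^([^:\n]*):(?= ) under re.M as a one-pass automaton: altMatch scans a line start
-- accumulating the candidate group (no ':' , no '\n'); on ': ' it emits the padded group;
-- altRest copies the rest of the line verbatim until the next line start.
mutual
def altMatch (acc : List Char) (cs : List Char) : List Char :=
  match cs with
  | [] => acc.reverse
  | c :: tl =>
    if c = '\n' then acc.reverse ++ '\n' :: altMatch [] tl
    else if c = ':' then
      if tl.head? = some ' ' then
        acc.reverse ++ List.replicate (30 - acc.length) ' ' ++ ':' :: altRest tl
      else acc.reverse ++ ':' :: altRest tl
    else altMatch (c :: acc) tl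
termination_by cs.length
decreasing_by all_goals (simp; try omega)

def altRest (cs : List Char) : List Char :=
  match cs with
  | [] => []
  | c :: tl => if c = '\n' then '\n' :: altMatch [] tl else c :: altRest tl
termination_by cs.length
decreasing_by all_goals (simp; try omega)
end

def indent_yaml_values_alt (txt : String) : String :=
  String.ofList (altMatch [] txt.toList)

-- ===== PRECONDITION & SPEC =====
def Spec_indent_yaml_values (txt : String) (out : String) : Prop := out = indent_yaml_values_alt txt
instance (txt : String) (out : String) : Decidable (Spec_indent_yaml_values txt out) := by unfold Spec_indent_yaml_values; infer_instance

-- ===== CLAIM (what is proved, stated in full; the proofs are below) =====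
def Claim_equal_indent_yaml_values : Prop := ∀ (txt : String), Dom_indent_yaml_values txt → Spec_indent_yaml_values txt (indent_yaml_values txt)

-- ===== LEMMAS AND PROOFS =====

-- simple structural splitter on '\n', to characterise PySem.Chars.splitOn
def nlSplit : List Char → List (List Char)
  | [] => [[]]
  | c :: tl => if c = '\n' then [] :: nlSplit tl
               else match nlSplit tl with
                 | h :: t => (c :: h) :: t
                 | [] => [[c]]

theorem nlSplit_ne_nil (cs : List Char) : nlSplit cs ≠ [] := by
  induction cs with
  | nil => simp [nlSplit]
  | cons c tl ih =>
    unfold nlSplit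
    by_cases hc : c = '\n'
    · simp [hc]
    · simp only [hc, if_false]
      cases h : nlSplit tl with
      | nil => exact absurd h ih
      | cons a b => simp

theorem splitOn_go_eq (fuel : Nat) (l cur : List Char) (acc : List (List Char)) (h : l.length < fuel) :
    PySem.Chars.splitOn.go ['\n'] fuel l cur acc =
      acc.reverse ++ (match nlSplit l with
        | h :: t => (cur.reverse ++ h) :: t
        | [] => []) := by
  induction fuel generalizing l cur acc with
  | zero => omega
  | succ f ih =>
    cases l with
    | nil => simp [PySem.Chars.splitOn.go, nlSplit]
    | cons c rest =>
      cases hr : nlSplit rest with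
      | nil => exact absurd hr (nlSplit_ne_nil rest)
      | cons h1 t1 =>
        by_cases hc : c = '\n'
        · subst hc
          rw [PySem.Chars.splitOn.go]
          simp only [List.isPrefixOf, BEq.rfl, Bool.and_eq_true, 
            if_true, and_true]
          rw [ih _ _ _ (by simp at h ⊢; omega)]
          simp [nlSplit, hr]
        · rw [PySem.Chars.splitOn.go]
          have hpre : List.isPrefixOf ['\n'] (c :: rest) = false := by
            simp [List.isPrefixOf]
            intro hcc
            exact absurd hcc.symm hc
          rw [hpre]
          simp only [Bool.false_eq_true, if_false]
          rw [ih _ _ _ (by simp at h ⊢; omega)]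
          simp [nlSplit, hc, hr]

theorem splitOn_eq_nlSplit (cs : List Char) :
    PySem.Chars.splitOn cs ['\n'] = nlSplit cs := by
  unfold PySem.Chars.splitOn
  rw [splitOn_go_eq _ _ _ _ (by omega)]
  cases h : nlSplit cs with
  | nil => exact absurd h (nlSplit_ne_nil cs)
  | cons a b => simp

theorem nlSplit_no_nl {cs : List Char} (h : '\n' ∉ cs) : nlSplit cs = [cs] := by
  induction cs with
  | nil => simp [nlSplit]
  | cons c tl ih =>
    have hc : c ≠ '\n' := fun hc => h (hc ▸ List.mem_cons_self ..)
    have htl : '\n' ∉ tl := fun hm => h (List.mem_cons_of_mem _ hm)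
    simp [nlSplit, hc, ih htl]

theorem nlSplit_append {line : List Char} (h : '\n' ∉ line) (rest : List Char) :
    nlSplit (line ++ '\n' :: rest) = line :: nlSplit rest := by
  induction line with
  | nil => simp [nlSplit]
  | cons c tl ih =>
    have hc : c ≠ '\n' := fun hc => h (hc ▸ List.mem_cons_self ..)
    have htl : '\n' ∉ tl := fun hm => h (List.mem_cons_of_mem _ hm)
    simp [nlSplit, hc, ih htl]

theorem find_colon_of_not_mem {line : List Char} (h : ':' ∉ line) :
    PySem.Chars.find line [':'] = -1 := by
  rw [PySem.Chars.find_eq_neg_one_iff]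
  intro hinf
  exact h (hinf.subset (by simp))

theorem find_colon_append (p t : List Char) (hp : ':' ∉ p) :
    PySem.Chars.find (p ++ ':' :: t) [':'] = (p.length : Int) := by
  have hnn : 0 ≤ PySem.Chars.find (p ++ ':' :: t) [':'] := by
    rw [PySem.Chars.find_nonneg_iff]
    exact ⟨p, t, by simp⟩
  obtain ⟨hpref, hmin⟩ := PySem.Chars.find_spec hnn
  set n := (PySem.Chars.find (p ++ ':' :: t) [':']).toNat with hn
  have hle : n ≤ p.length := by
    by_contra hgt
    rw [Nat.not_le] at hgt
    exact hmin p.length hgt ⟨t, by simp⟩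
  have hge : p.length ≤ n := by
    by_contra hlt
    rw [Nat.not_le] at hlt
    rw [List.drop_append_of_le_length (le_of_lt hlt)] at hpref
    cases hd : p.drop n with
    | nil => have := List.drop_eq_nil_iff.mp hd; omega
    | cons x xs =>
      rw [hd] at hpref
      have hx : x = ':' := by
        obtain ⟨w, hw⟩ := hpref
        simpa using congrArg (List.head? ·) hw.symm
      exact hp (List.drop_subset n p (hd ▸ (hx ▸ List.mem_cons_self ..)))
  have : n = p.length := le_antisymm hle hge
  omega

theorem aLine_no_colon {line : List Char} (h : ':' ∉ line) : aLine line = line := by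
  simp only [aLine]
  rw [find_colon_of_not_mem h]
  norm_num

theorem aLine_decomp (p t : List Char) (hp : ':' ∉ p) :
    aLine (p ++ ':' :: t) =
      if t.take 1 = [' ']
      then p ++ List.replicate (30 - p.length) ' ' ++ ':' :: t
      else p ++ ':' :: t := by
  simp only [aLine]
  rw [find_colon_append p t hp]
  rw [if_pos (by exact_mod_cast Nat.zero_le p.length)]
  have h1 : ((p.length : Int) + 1) = ((p.length + 1 : Nat) : Int) := by push_cast; ring
  have h2 : ((p.length : Int) + 2) = ((p.length + 2 : Nat) : Int) := by push_cast; ring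
  rw [h1, h2, PySem.List.slice_natCast, PySem.List.slice_to_natCast, PySem.List.slice_from_natCast]
  have hdropP : (p ++ ':' :: t).drop p.length = ':' :: t := by simp
  have hdrop : (p ++ ':' :: t).drop (p.length + 1) = t := by
    rw [← List.drop_drop, hdropP]
    rfl
  have harith : p.length + 2 - (p.length + 1) = 1 := by omega
  have htoNat : ((30 : Int) - (p.length : Int)).toNat = 30 - p.length := by omega
  rw [harith, hdrop, List.take_left, hdropP, htoNat]

-- optional continuation after a line: none = end of text, some rest = '\n' then rest
def extTail : Option (List Char) → List Char
  | none => []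
  | some r => '\n' :: r

def contTail : Option (List Char) → List Char
  | none => []
  | some r => '\n' :: altMatch [] r

theorem altRest_line {t : List Char} (ht : '\n' ∉ t) (o : Option (List Char)) :
    altRest (t ++ extTail o) = t ++ contTail o := by
  induction t with
  | nil =>
    cases o with
    | none => simp [altRest, extTail, contTail]
    | some r => simp [altRest, extTail, contTail]
  | cons c tl ih =>
    have hc : c ≠ '\n' := fun hc => ht (hc ▸ List.mem_cons_self ..)
    have htl : '\n' ∉ tl := fun hm => ht (List.mem_cons_of_mem _ hm)
    rw [List.cons_append, altRest]
    simp [hc, ih htl]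

theorem altMatch_no_colon {p : List Char} (hp : ':' ∉ p ∧ '\n' ∉ p) (acc : List Char)
    (o : Option (List Char)) :
    altMatch acc (p ++ extTail o) = acc.reverse ++ p ++ contTail o := by
  induction p generalizing acc with
  | nil =>
    cases o with
    | none => simp [altMatch, extTail, contTail]
    | some r => simp [altMatch, extTail, contTail]
  | cons c tl ih =>
    have hc1 : c ≠ ':' := fun h => hp.1 (h ▸ List.mem_cons_self ..)
    have hc2 : c ≠ '\n' := fun h => hp.2 (h ▸ List.mem_cons_self ..)
    have htl : ':' ∉ tl ∧ '\n' ∉ tl :=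
      ⟨fun hm => hp.1 (List.mem_cons_of_mem _ hm), fun hm => hp.2 (List.mem_cons_of_mem _ hm)⟩
    rw [List.cons_append, altMatch]
    simp only [hc1, hc2, if_false]
    rw [ih htl (c :: acc)]
    simp

theorem altMatch_colon {p : List Char} (hp : ':' ∉ p ∧ '\n' ∉ p) (acc t : List Char)
    (ht : '\n' ∉ t) (o : Option (List Char)) :
    altMatch acc (p ++ ':' :: t ++ extTail o) =
      (if t.take 1 = [' ']
       then acc.reverse ++ p ++ List.replicate (30 - (acc.length + p.length)) ' ' ++ ':' :: t ++ contTail o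
       else acc.reverse ++ p ++ ':' :: t ++ contTail o) := by
  induction p generalizing acc with
  | nil =>
    cases t with
    | nil =>
      cases o with
      | none => simp [altMatch, extTail, contTail, altRest]
      | some r => simp [altMatch, extTail, contTail, altRest]
    | cons x t2 =>
      have hrest := altRest_line ht o
      simp only [List.cons_append] at hrest
      by_cases hx : x = ' '
      · subst hx
        simp [altMatch, hrest, List.take, contTail]
      · simp [altMatch, hrest, List.take, hx]
  | cons c tl ih =>
    have hc1 : c ≠ ':' := fun h => hp.1 (h ▸ List.mem_cons_self ..)
    have hc2 : c ≠ '\n' := fun h => hp.2 (h ▸ List.mem_cons_self ..)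
    have htl : ':' ∉ tl ∧ '\n' ∉ tl :=
      ⟨fun hm => hp.1 (List.mem_cons_of_mem _ hm), fun hm => hp.2 (List.mem_cons_of_mem _ hm)⟩
    rw [List.cons_append, List.cons_append, altMatch]
    simp only [hc1, hc2, if_false]
    rw [ih htl (c :: acc)]
    have hlen : (c :: acc).length + tl.length = acc.length + (c :: tl).length := by
      simp; omega
    rw [hlen]
    split <;> simp

theorem first_occ {a : Char} {l : List Char} (h : a ∈ l) :
    ∃ p t, l = p ++ a :: t ∧ a ∉ p := by
  induction l with
  | nil => cases h
  | cons c tl ih =>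
    by_cases hc : c = a
    · exact ⟨[], tl, by simp [hc], by simp⟩
    · have hmem : a ∈ tl := by
        rcases List.mem_cons.mp h with h1 | h2
        · exact absurd h1.symm hc
        · exact h2
      obtain ⟨p, t, hpt, hna⟩ := ih hmem
      refine ⟨c :: p, t, by simp [hpt], ?_⟩
      intro hm
      rcases List.mem_cons.mp hm with h1 | h2
      · exact hc h1.symm
      · exact hna h2

theorem altMatch_line {line : List Char} (h : '\n' ∉ line) (o : Option (List Char)) :
    altMatch [] (line ++ extTail o) = aLine line ++ contTail o := by
  by_cases hc : ':' ∈ line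
  · obtain ⟨p, t, hline, hpc⟩ := first_occ hc
    have hpn : '\n' ∉ p := fun hm => h (hline ▸ List.mem_append_left _ hm)
    have htn : '\n' ∉ t := fun hm => h (hline ▸ List.mem_append_right _ (List.mem_cons_of_mem _ hm))
    rw [hline, aLine_decomp p t hpc]
    have hm := altMatch_colon ⟨hpc, hpn⟩ [] t htn o
    simp only [List.reverse_nil, List.nil_append, List.length_nil, Nat.zero_add] at hm
    rw [hm]
    split <;> simp
  · rw [aLine_no_colon hc]
    have := altMatch_no_colon ⟨hc, h⟩ [] o
    simpa using this

theorem main_eq (cs : List Char) :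
    altMatch [] cs = PySem.Chars.join ['\n'] ((nlSplit cs).map aLine) := by
  by_cases hnl : '\n' ∈ cs
  · obtain ⟨line, rest, hcs, hlnl⟩ := first_occ hnl
    have hrec := main_eq rest
    rw [hcs, nlSplit_append hlnl]
    have h1 := altMatch_line hlnl (some rest)
    simp only [extTail, contTail] at h1
    rw [h1, hrec]
    cases hr : nlSplit rest with
    | nil => exact absurd hr (nlSplit_ne_nil rest)
    | cons a b =>
      simp only [List.map_cons, PySem.Chars.join_cons_cons]
      simp
  · have h1 := altMatch_line hnl none
    simp only [extTail, contTail, List.append_nil] at h1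
    rw [nlSplit_no_nl hnl]
    simpa using h1
termination_by cs.length
decreasing_by
  rw [hcs]; simp; omega

-- ===== VERDICT (by name: the statement is the Claim_ definition above) =====
theorem indent_yaml_values_spec : Claim_equal_indent_yaml_values := by
  intro txt _
  show String.ofList (PySem.Chars.join ['\n']
      ((PySem.Chars.splitOn txt.toList ['\n']).foldl (fun r line => r ++ [aLine line]) [])) =
    String.ofList (altMatch [] txt.toList)
  rw [splitOn_eq_nlSplit, PySem.List.foldl_append_singleton_eq_map, main_eq, List.nil_append]
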